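-- pv_equiv track=rewrite | github.com/mautsajayden/CMSC-201- | Homework/Homework5/quasi_palindrome.py | quasi_palindrome
-- ===== SOURCE A (Python) =====
-- def quasi_palindrome(word, errors):
--
--     varWord = []
--     reversedWord = ""
--     wrongLetters = 0
--
--     #puts the word into a list
--     for i in word:
--         varWord.append(i)
--
--     #reverse the word
--     for i in range(len(varWord)//2):
--         varWord[i], varWord[len(varWord)-i-1] = varWord[len(varWord)-i-1], varWord[i]
--
--     #concanates the reversed word from the list
--     for j in varWord:
--         reversedWord += j
--
--     #counts the number of erros
--     for i in range(len(word)):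
--         if word[i] != reversedWord[i]:
--             wrongLetters += 1
--
--     #un accounts for the double erros
--     wrongLetters //= 2
--
--     #returns true or false
--     return wrongLetters <= errors
-- ===== SOURCE B (Python) =====
-- def quasi_palindrome(word, errors):
--     n = len(word)
--     mismatches = 0
--     for i in range(n // 2):
--         if word[i] != word[n - 1 - i]:
--             mismatches += 1
--     return mismatches <= errors
-- ===== Notes on version B (the rewrite author's own statement) =====
-- stated objective: simpler
-- what changed: B replaces A's four passes (copy to a list, in-place swap reversal, string rebuild, full-length mismatch count halved at the end) by one two-pointer loop over the first half that counts each mismatched pair once and compares the count to errors directly; doing a single half-length pass with no intermediate structures is also a constant-factor speedup.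
import Mathlib
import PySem

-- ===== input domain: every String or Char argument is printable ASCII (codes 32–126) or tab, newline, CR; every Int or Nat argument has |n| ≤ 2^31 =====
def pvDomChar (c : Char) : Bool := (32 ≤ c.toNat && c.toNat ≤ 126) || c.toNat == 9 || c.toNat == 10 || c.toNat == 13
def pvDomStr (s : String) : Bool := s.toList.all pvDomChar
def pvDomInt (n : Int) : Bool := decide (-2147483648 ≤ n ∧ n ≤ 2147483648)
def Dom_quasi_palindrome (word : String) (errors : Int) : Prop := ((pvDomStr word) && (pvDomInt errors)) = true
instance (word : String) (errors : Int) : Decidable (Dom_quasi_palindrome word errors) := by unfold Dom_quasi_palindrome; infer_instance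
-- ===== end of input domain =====

-- B replaces A's four passes (copy, in-place swap reversal, string rebuild, full count halved)
-- by a single half-length two-pointer mismatch count; same result, simpler (objective: simpler).


-- ===== PORT A =====
-- Literal transliteration of A; all loop indices are nonnegative in-range Python ints,
-- so the loops over range(...) are folds over List.range and element reads use getD
-- (the default ' ' is never hit on the indices used).
-- Python's tuple assignment 'varWord[i], varWord[n-i-1] = varWord[n-i-1], varWord[i]':
-- both right-hand values are read from the pre-assignment list, then index i is set, then n-i-1.
def pvSwapStep (acc : List Char) (i : Nat) : List Char :=
  let x := acc.getD (acc.length - i - 1) ' '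
  let y := acc.getD i ' '
  (acc.set i x).set (acc.length - i - 1) y

def quasi_palindrome (word : String) (errors : Int) : Bool :=
  -- for i in word: varWord.append(i)
  let varWord : List Char := word.toList.foldl (fun acc c => acc ++ [c]) []
  -- for i in range(len(varWord)//2): swap varWord[i], varWord[len(varWord)-i-1]
  let varWord : List Char := (List.range (varWord.length / 2)).foldl pvSwapStep varWord
  -- for j in varWord: reversedWord += j   (kept as the list of its characters)
  let reversedWord : List Char := varWord.foldl (fun acc c => acc ++ [c]) []
  -- for i in range(len(word)): if word[i] != reversedWord[i]: wrongLetters += 1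
  let wrongLetters : Int :=
    (List.range word.toList.length).foldl (fun cnt i =>
      if word.toList.getD i ' ' ≠ reversedWord.getD i ' ' then cnt + 1 else cnt) 0
  -- wrongLetters //= 2; return wrongLetters <= errors
  decide (PySem.Int.floordiv wrongLetters 2 ≤ errors)

-- ===== PORT B =====
def quasi_palindrome_alt (word : String) (errors : Int) : Bool :=
  let l := word.toList
  let n := l.length
  let mismatches : Int :=
    (List.range (n / 2)).foldl (fun c i =>
      if l.getD i ' ' ≠ l.getD (n - 1 - i) ' ' then c + 1 else c) 0
  decide (mismatches ≤ errors)

-- ===== PRECONDITION & SPEC =====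
def Spec_quasi_palindrome (word : String) (errors : Int) (out : Bool) : Prop := out = quasi_palindrome_alt word errors
instance (word : String) (errors : Int) (out : Bool) : Decidable (Spec_quasi_palindrome word errors out) := by unfold Spec_quasi_palindrome; infer_instance

-- ===== CLAIM (what is proved, stated in full; the proofs are below) =====
def Claim_equal_quasi_palindrome : Prop := ∀ (word : String) (errors : Int), Dom_quasi_palindrome word errors → Spec_quasi_palindrome word errors (quasi_palindrome word errors)

-- ===== LEMMAS AND PROOFS =====

theorem foldl_append_singleton (l acc : List Char) :
    l.foldl (fun acc c => acc ++ [c]) acc = acc ++ l := by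
  induction l generalizing acc with
  | nil => simp
  | cons a t ih => simp [List.foldl, ih]

-- counting fold = Finset sum
theorem foldl_count_eq_sum (p : Nat → Prop) [DecidablePred p] (n : Nat) (a : Int) :
    (List.range n).foldl (fun c i => if p i then c + 1 else c) a
      = a + ∑ i ∈ Finset.range n, (if p i then (1 : Int) else 0) := by
  induction n generalizing a with
  | zero => simp
  | succ m ih =>
    rw [List.range_succ, List.foldl_append, ih, Finset.sum_range_succ]
    simp only [List.foldl]
    split_ifs <;> ring

-- length is preserved by the swap fold
theorem swapFold_length (l : List Char) (k : Nat) :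
    ((List.range k).foldl pvSwapStep l).length = l.length := by
  induction k with
  | zero => simp
  | succ m ih =>
    rw [List.range_succ, List.foldl_append]
    simp only [List.foldl, pvSwapStep, List.length_set]
    exact ih

-- one swap step, read at any position
theorem pvSwapStep_getD (acc : List Char) (i j : Nat) (hi : i < acc.length / 2) :
    (pvSwapStep acc i).getD j ' ' =
      if j = i then acc.getD (acc.length - i - 1) ' '
      else if j = acc.length - i - 1 then acc.getD i ' '
      else acc.getD j ' ' := by
  have h1 : i < acc.length := by omega
  have h2 : acc.length - i - 1 < acc.length := by omega
  have h3 : i ≠ acc.length - i - 1 := by omega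
  simp only [pvSwapStep, List.getD_eq_getElem?_getD, List.getElem?_set, List.length_set]
  by_cases hji : j = i
  · rw [if_neg (show ¬(acc.length - i - 1 = j) from by omega), if_pos hji.symm,
      if_pos h1, if_pos hji, Option.getD_some]
  · by_cases hjm : j = acc.length - i - 1
    · rw [if_pos hjm.symm, if_pos h2, if_neg hji, if_pos hjm, Option.getD_some]
    · rw [if_neg (show ¬(acc.length - i - 1 = j) from fun h => hjm h.symm),
        if_neg (fun h => hji h.symm), if_neg hji, if_neg hjm]

-- characterisation of the swap loop: after k swaps the first k and last k positions are mirrored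
theorem swapLoop_getD (l : List Char) (k : Nat) (hk : k ≤ l.length / 2) :
    ∀ j,
      ((List.range k).foldl pvSwapStep l).getD j ' '
      = if j < k ∨ (l.length - k ≤ j ∧ j < l.length) then l.getD (l.length - 1 - j) ' '
        else l.getD j ' ' := by
  induction k with
  | zero => intro j; simp
  | succ m ih =>
    intro j
    have hm : m ≤ l.length / 2 := by omega
    have hmem := ih hm
    rw [List.range_succ, List.foldl_append]
    simp only [List.foldl]
    have hlen := swapFold_length l m
    set g := (List.range m).foldl pvSwapStep l with hg
    have hstep := pvSwapStep_getD g m j (by rw [hlen]; omega)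
    rw [hstep, hlen]
    have hn2m : 2 * (m + 1) ≤ l.length := by
      have := Nat.div_mul_le_self l.length 2
      omega
    by_cases hj1 : j = m
    · subst hj1
      rw [if_pos rfl, hmem (l.length - j - 1),
          if_neg (by omega), if_pos (by omega)]
      congr 1; omega
    · rw [if_neg hj1]
      by_cases hj2 : j = l.length - m - 1
      · rw [if_pos hj2, hmem m, if_neg (by omega), if_pos (by omega)]
        subst hj2; congr 1; omega
      · rw [if_neg hj2, hmem j]
        by_cases hc : j < m ∨ (l.length - m ≤ j ∧ j < l.length)
        · rw [if_pos hc, if_pos (by omega)]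
        · rw [if_neg hc, if_neg (fun h => hc (by omega))]

-- f is symmetric under reflection
theorem refl_symm (l : List Char) (j : Nat) (hj : j < l.length) :
    (if l.getD (l.length - 1 - j) ' ' ≠ l.getD (l.length - 1 - (l.length - 1 - j)) ' ' then (1:Int) else 0)
      = (if l.getD j ' ' ≠ l.getD (l.length - 1 - j) ' ' then (1:Int) else 0) := by
  have : l.length - 1 - (l.length - 1 - j) = j := by omega
  rw [this]
  simp only [List.getD_eq_getElem?_getD]
  by_cases h : l[j]?.getD ' ' = l[l.length - 1 - j]?.getD ' '
  · rw [if_neg (by simp [h]), if_neg (by simp [h])]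
  · rw [if_pos (fun he => h he.symm), if_pos h]

-- the full-length mismatch sum is twice the half-length one
theorem full_sum_eq_two_half (l : List Char) :
    (∑ i ∈ Finset.range l.length, (if l.getD i ' ' ≠ l.getD (l.length - 1 - i) ' ' then (1:Int) else 0))
      = 2 * ∑ i ∈ Finset.range (l.length / 2), (if l.getD i ' ' ≠ l.getD (l.length - 1 - i) ' ' then (1:Int) else 0) := by
  set n := l.length with hn
  set f : Nat → Int := fun i => if l.getD i ' ' ≠ l.getD (n - 1 - i) ' ' then (1:Int) else 0 with hf
  have hsymm : ∀ j < n, f (n - 1 - j) = f j := by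
    intro j hj
    simpa [hf] using refl_symm l j hj
  have hsplit : (∑ i ∈ Finset.range n, f i)
      = (∑ i ∈ Finset.range (n / 2), f i) + ∑ i ∈ Finset.Ico (n / 2) n, f i := by
    rw [Finset.range_eq_Ico, ← Finset.sum_Ico_consecutive _ (Nat.zero_le _) (Nat.div_le_self n 2),
      ← Finset.range_eq_Ico]
  -- tail sum: reindex to the front
  have htail : (∑ i ∈ Finset.Ico (n / 2) n, f i) = ∑ j ∈ Finset.range (n - n / 2), f j := by
    have h1 : (∑ i ∈ Finset.Ico (n / 2) n, f i) = ∑ j ∈ Finset.range (n - n / 2), f (n / 2 + j) := by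
      rw [Finset.sum_Ico_eq_sum_range]
    rw [h1, ← Finset.sum_range_reflect (fun j => f (n / 2 + j)) (n - n / 2)]
    apply Finset.sum_congr rfl
    intro j hj
    rw [Finset.mem_range] at hj
    have h2 : n / 2 + (n - n / 2 - 1 - j) = n - 1 - j := by omega
    rw [h2, hsymm j (by omega)]
  have hmid : (∑ j ∈ Finset.range (n - n / 2), f j) = ∑ j ∈ Finset.range (n / 2), f j := by
    rcases Nat.even_or_odd n with he | ho
    · have heq := Nat.even_iff.mp he
      have : n - n / 2 = n / 2 := by omega
      rw [this]
    · have hodd : n % 2 = 1 := Nat.odd_iff.mp ho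
      have : n - n / 2 = n / 2 + 1 := by omega
      rw [this, Finset.sum_range_succ]
      have hmidzero : f (n / 2) = 0 := by
        have : n - 1 - n / 2 = n / 2 := by omega
        simp [hf, this]
      rw [hmidzero, add_zero]
  rw [hsplit, htail, hmid]; ring

-- ===== VERDICT (by name: the statement is the Claim_ definition above) =====
theorem quasi_palindrome_spec : Claim_equal_quasi_palindrome := by
  intro word errors _
  unfold Spec_quasi_palindrome quasi_palindrome quasi_palindrome_alt
  simp only [foldl_append_singleton, List.nil_append]
  set l := word.toList with hl
  set n := l.length with hn
  -- the reversed word read at i < n is l[n-1-i]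
  have hrev := swapLoop_getD l (n / 2) (le_refl _)
  rw [← hn] at hrev
  rw [foldl_count_eq_sum (fun i => l.getD i ' ' ≠ ((List.range (n / 2)).foldl pvSwapStep l).getD i ' '),
      foldl_count_eq_sum (fun i => l.getD i ' ' ≠ l.getD (n - 1 - i) ' '), zero_add, zero_add]
  have hsum : (∑ i ∈ Finset.range n, (if l.getD i ' ' ≠ ((List.range (n / 2)).foldl pvSwapStep l).getD i ' ' then (1:Int) else 0))
      = ∑ i ∈ Finset.range n, (if l.getD i ' ' ≠ l.getD (n - 1 - i) ' ' then (1:Int) else 0) := by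
    apply Finset.sum_congr rfl
    intro i hi
    rw [Finset.mem_range] at hi
    rw [hrev i]
    by_cases hc : i < n / 2 ∨ (n - n / 2 ≤ i ∧ i < n)
    · rw [if_pos hc]
    · -- middle of an odd word: i = n/2, n odd, so n-1-i = i
      rw [if_neg hc]
      have hmid : n - 1 - i = i := by omega
      rw [hmid]
  rw [hsum, full_sum_eq_two_half]
  have h2 : PySem.Int.floordiv
      (2 * ∑ i ∈ Finset.range (n / 2), (if l.getD i ' ' ≠ l.getD (n - 1 - i) ' ' then (1:Int) else 0)) 2
      = ∑ i ∈ Finset.range (n / 2), (if l.getD i ' ' ≠ l.getD (n - 1 - i) ' ' then (1:Int) else 0) := by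
    rw [PySem.Int.floordiv_eq_ediv_of_pos (by omega)]
    exact Int.mul_ediv_cancel_left _ (by norm_num)
  rw [h2]
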